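-- pv_equiv track=rewrite | github.com/tulip-control/tulip-control | tulip/spec/form.py | mutex
-- ===== SOURCE A (Python) =====
-- def mutex(varnames):
--     """Create mutual exclusion formulae from iterable of variables.
--
--     E.g., given a set of variable names {"a", "b", "c"}, return a set
--     of formulae {"a -> ! (c || b)", "c -> ! (b)"}.
--     """
--     mutex = set()
--     numVars = len(varnames)
--     varnames = list(varnames)
--     for i in range(0, numVars - 1):
--         mut_str = varnames[i] + ' -> ! (' + varnames[i + 1]
--         for j in range(i + 2, numVars):
--             mut_str += ' || ' + varnames[j]
--         mut_str += ')'
--         mutex |= {mut_str}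
--     return mutex
-- ===== SOURCE B (Python) =====
-- def mutex(varnames):
--     """Create mutual exclusion formulae from iterable of variables.
--
--     Single backward pass carrying one accumulated ' || '-suffix,
--     instead of re-joining each tail slice.
--     """
--     names = list(varnames)
--     formulas = []
--     suffix = None
--     for name in reversed(names):
--         if suffix is not None:
--             formulas.append(name + ' -> ! (' + suffix + ')')
--             suffix = name + ' || ' + suffix
--         else:
--             suffix = name
--     formulas.reverse()
--     return set(formulas)
-- ===== Notes on version B (the rewrite author's own statement) =====
-- stated objective: alternative
-- what changed: Replaces the nested index loops (each formula re-joins its whole tail slice) by one backward structural recursion that threads a single accumulated ' || '-suffix, so each name is appended once.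
import Mathlib
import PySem

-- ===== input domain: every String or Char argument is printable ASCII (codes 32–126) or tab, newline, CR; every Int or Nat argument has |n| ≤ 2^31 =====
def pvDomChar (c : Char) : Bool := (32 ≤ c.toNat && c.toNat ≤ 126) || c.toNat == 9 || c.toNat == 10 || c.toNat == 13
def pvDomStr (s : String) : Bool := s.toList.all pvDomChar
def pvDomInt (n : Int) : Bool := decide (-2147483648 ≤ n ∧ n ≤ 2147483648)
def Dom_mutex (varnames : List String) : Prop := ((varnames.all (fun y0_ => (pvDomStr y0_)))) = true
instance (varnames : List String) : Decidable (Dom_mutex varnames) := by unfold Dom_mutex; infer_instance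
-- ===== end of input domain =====

-- B replaces A's nested index loops (each formula re-joins its tail slice) by one
-- backward structural recursion carrying a single accumulated ' || '-suffix (objective: alternative).

-- ===== PORT A =====
def mutex (varnames : List String) : List String :=
  let numVars : Int := varnames.length
  (PySem.List.pyRange 0 (numVars - 1) 1).foldl (fun mset i =>
    let mut_str := PySem.List.pyGetD varnames i "" ++ " -> ! (" ++ PySem.List.pyGetD varnames (i + 1) ""
    let mut_str := (PySem.List.pyRange (i + 2) numVars 1).foldl
      (fun s j => s ++ " || " ++ PySem.List.pyGetD varnames j "") mut_str
    PySem.Set.add mset (mut_str ++ ")")) PySem.Set.empty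

-- ===== PORT B =====
-- one step of Source B's backward loop: state = (suffix so far (None before the first name), formulas)
def mutexAltStep (st : Option String × List String) (name : String) : Option String × List String :=
  match st.1 with
  | some suffix => (some (name ++ " || " ++ suffix), st.2 ++ [name ++ " -> ! (" ++ suffix ++ ")"])
  | none => (some name, st.2)

def mutex_alt (varnames : List String) : List String :=
  let st := varnames.reverse.foldl mutexAltStep (none, [])
  PySem.Set.ofList st.2.reverse

-- ===== PRECONDITION & SPEC =====
def Spec_mutex (varnames : List String) (out : List String) : Prop := out = mutex_alt varnames
instance (varnames : List String) (out : List String) : Decidable (Spec_mutex varnames out) := by unfold Spec_mutex; infer_instance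

-- ===== CLAIM (what is proved, stated in full; the proofs are below) =====
def Claim_equal_mutex : Prop := ∀ (varnames : List String), Dom_mutex varnames → Spec_mutex varnames (mutex varnames)

-- ===== LEMMAS AND PROOFS =====

-- proof-side helper: structural characterisation of Source B's loop state on a nonempty list
def mutexAltAux : List String → String × List String
  | [] => ("", [])
  | [x] => (x, [])
  | x :: rest =>
      let (suffix, formulas) := mutexAltAux rest
      (x ++ " || " ++ suffix, (x ++ " -> ! (" ++ suffix ++ ")") :: formulas)

-- Source B's reversed-loop fold computes exactly aux's suffix and (reversed) formula list.
lemma fold_state_eq : ∀ (l : List String), l ≠ [] →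
    l.reverse.foldl mutexAltStep (none, [])
      = (some (mutexAltAux l).1, (mutexAltAux l).2.reverse) := by
  intro l hl
  induction l with
  | nil => exact absurd rfl hl
  | cons x t ih =>
      rw [List.reverse_cons, List.foldl_append]
      cases t with
      | nil => rfl
      | cons y t' =>
          rw [ih (by simp)]
          cases t' <;> simp [mutexAltStep, mutexAltAux]

-- A's inner join loop, already in list form, equals the suffix computed by B's aux.
lemma fold_join (t : List String) (y P : String) :
    t.foldl (fun s v => s ++ " || " ++ v) (P ++ y) = P ++ (mutexAltAux (y :: t)).1 := by
  induction t generalizing y P with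
  | nil => simp [mutexAltAux]
  | cons v t' ih =>
      show t'.foldl (fun s v => s ++ " || " ++ v) ((P ++ y) ++ " || " ++ v) = _
      have h : ((P ++ y) ++ " || ") ++ v = ((P ++ (y ++ " || ")) ++ v) := by
        simp [String.append_assoc]
      rw [h, ih v (P ++ (y ++ " || "))]
      cases t' <;> simp [mutexAltAux, String.append_assoc]

-- The list of formulas A produces (index form, already reduced to list operations)
-- equals the formula list of B's aux.
lemma main_lemma (l : List String) :
    (List.range (l.length - 1)).map (fun i =>
        ((l.drop (i + 2)).foldl (fun s v => s ++ " || " ++ v)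
          (l.getD i "" ++ " -> ! (" ++ l.getD (i + 1) "")) ++ ")")
      = (mutexAltAux l).2 := by
  induction l with
  | nil => simp [mutexAltAux]
  | cons x t ih =>
      cases t with
      | nil => simp [mutexAltAux]
      | cons y t' =>
          rw [show (x :: y :: t').length - 1 = t'.length + 1 from by simp,
              List.range_succ_eq_map, List.map_cons, List.map_map]
          have h0 : (((x :: y :: t').drop 2).foldl (fun s v => s ++ " || " ++ v)
              ((x :: y :: t').getD 0 "" ++ " -> ! (" ++ (x :: y :: t').getD 1 "")) ++ ")"
              = x ++ " -> ! (" ++ (mutexAltAux (y :: t')).1 ++ ")" := by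
            have e3 : (x :: y :: t').drop 2 = t' := rfl
            have e1 : (x :: y :: t').getD 0 "" = x := rfl
            have e2 : (x :: y :: t').getD 1 "" = y := rfl
            rw [e1, e2, e3, fold_join t' y (x ++ " -> ! (")]
          have h1 : (List.range (t'.length + 1 - 1)).map
              ((fun i => (((x :: y :: t').drop (i + 2)).foldl (fun s v => s ++ " || " ++ v)
                ((x :: y :: t').getD i "" ++ " -> ! (" ++ (x :: y :: t').getD (i + 1) "")) ++ ")")
               ∘ (fun i => i + 1))
              = (mutexAltAux (y :: t')).2 := by
            rw [← ih]
            rfl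
          simp only [Nat.add_sub_cancel] at h1 ⊢
          rw [h0, h1]
          cases t' <;> rfl

-- A's whole computation reduced to Set.ofList of that formula list.
lemma mutex_eq_ofList (l : List String) :
    mutex l = PySem.Set.ofList ((List.range (l.length - 1)).map (fun i =>
        ((l.drop (i + 2)).foldl (fun s v => s ++ " || " ++ v)
          (l.getD i "" ++ " -> ! (" ++ l.getD (i + 1) "")) ++ ")")) := by
  rw [PySem.Set.ofList_eq_foldl, List.foldl_map]
  simp only [mutex]
  have hrange : PySem.List.pyRange 0 ((l.length : Int) - 1) 1
      = (List.range (l.length - 1)).map (fun k : Nat => (k : Int)) := by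
    rw [PySem.List.pyRange_one]
    have h : ((l.length : Int) - 1 - 0).toNat = l.length - 1 := by omega
    rw [h]
    simp
  rw [hrange, List.foldl_map]
  apply PySem.List.foldl_congr_mem
  intro acc k _
  congr 1
  have hk0 : (0 : Int) ≤ (k : Int) + 2 := by positivity
  rw [PySem.List.foldl_pyRange_pyGetD' l "" (fun s v => s ++ " || " ++ v) _ hk0]
  have hdrop : ((k : Int) + 2).toNat = k + 2 := by omega
  rw [hdrop]
  congr 1
  rw [PySem.List.pyGetD_natCast,
    show (k : Int) + 1 = ((k + 1 : Nat) : Int) from by push_cast; ring,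
    PySem.List.pyGetD_natCast]

-- ===== VERDICT (by name: the statement is the Claim_ definition above) =====
theorem mutex_spec : Claim_equal_mutex := by
  intro varnames _
  show mutex varnames = mutex_alt varnames
  rw [mutex_eq_ofList, main_lemma]
  cases varnames with
  | nil => rfl
  | cons x t =>
      show _ = PySem.Set.ofList ((x :: t).reverse.foldl mutexAltStep (none, [])).2.reverse
      rw [fold_state_eq (x :: t) (by simp), List.reverse_reverse]
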